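-- pv_equiv track=rewrite | github.com/GotoRyusuke/EDGAR | Counters/russia_counters.py | count_sentences_in_text
-- ===== SOURCE A (Python) =====
-- def find_first_word_index(phrases: list, sentence: list):
--     first_words_index_dict = {}
--     for phrase in phrases:
--         first_word_star = phrase[0]
--         if first_word_star not in first_words_index_dict.keys():
--             first_word_index = []
--             if '*' in first_word_star:
--                 first_word = first_word_star.split('*')[0]
--                 for w_i in range(len(sentence)):
--                     w = sentence[w_i]
--                     if w[:len(first_word)] == first_word:
--                         first_word_index.append(w_i)
--             else:
--                 first_word = first_word_star
--                 for w_i in range(len(sentence)):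
--                     w = sentence[w_i]
--                     if w == first_word:
--                         first_word_index.append(w_i)
--             first_words_index_dict[first_word_star] = first_word_index
--     return first_words_index_dict
--
-- def phrase_in_sentence(phrase: list,  first_word_index: list, sentence: list):
--     for f_idx in first_word_index:
--         flag = True
--         for kw_i in range(len(phrase)):
--             if f_idx + kw_i >= len(sentence):
--                 return False
--             kw = phrase[kw_i]
--             if '*' in kw:
--                 kw = kw.split('*')[0]
--
--                 if sentence[f_idx+kw_i][:len(kw)] != kw:
--                     flag = False
--                     break
--             else:
--                 if sentence[f_idx+kw_i][:len(kw)] != kw: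
--                     flag = False
--                     break
--
--         if flag:
--             return True
--     return False
--
-- def count_sentences_in_text(words_list, text_sentences: list):
--     dict_count = 0
--     symbols = [",", ".", "!", "?"]
--     for sent in text_sentences:
--         for symbol in symbols:
--             sent = sent.replace(symbol, "").lower()
--         sentence = [w.lower() for w in sent.split()]
--         first_words_index_dict = find_first_word_index(phrases=words_list, sentence=sentence)
--         for w in words_list:
--             if phrase_in_sentence(phrase=w,  first_word_index=first_words_index_dict[w[0]], sentence=sentence):
--                 dict_count += 1
--                 break
--     return dict_count
-- ===== SOURCE B (Python) =====
-- # B: same counting task, but phrase matching is a direct sliding-window scan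
-- # (no first-word index dict, no per-phrase candidate lists).
--
-- def _stem(kw):
--     return kw.split('*')[0] if '*' in kw else kw
--
-- def _phrase_hits(phrase, words):
--     n = len(phrase)
--     head = phrase[0]
--     star = '*' in head
--     h = _stem(head)
--     for i in range(len(words) - n + 1):
--         if (words[i].startswith(h) if star else words[i] == head):
--             if all(words[i + j].startswith(_stem(phrase[j])) for j in range(1, n)):
--                 return True
--     return False
--
-- def count_sentences_in_text(words_list, text_sentences: list):
--     count = 0
--     for sent in text_sentences:
--         for symbol in [",", ".", "!", "?"]:
--             sent = sent.replace(symbol, "").lower()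
--         words = [w.lower() for w in sent.split()]
--         if any(_phrase_hits(p, words) for p in words_list):
--             count += 1
--     return count
-- ===== Notes on version B (the rewrite author's own statement) =====
-- stated objective: simpler
-- what changed: B drops A's first-word index dict (find_first_word_index) and per-phrase candidate-index lists entirely and tests each phrase with one direct sliding-window scan over the sentence's word positions.
import Mathlib
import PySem

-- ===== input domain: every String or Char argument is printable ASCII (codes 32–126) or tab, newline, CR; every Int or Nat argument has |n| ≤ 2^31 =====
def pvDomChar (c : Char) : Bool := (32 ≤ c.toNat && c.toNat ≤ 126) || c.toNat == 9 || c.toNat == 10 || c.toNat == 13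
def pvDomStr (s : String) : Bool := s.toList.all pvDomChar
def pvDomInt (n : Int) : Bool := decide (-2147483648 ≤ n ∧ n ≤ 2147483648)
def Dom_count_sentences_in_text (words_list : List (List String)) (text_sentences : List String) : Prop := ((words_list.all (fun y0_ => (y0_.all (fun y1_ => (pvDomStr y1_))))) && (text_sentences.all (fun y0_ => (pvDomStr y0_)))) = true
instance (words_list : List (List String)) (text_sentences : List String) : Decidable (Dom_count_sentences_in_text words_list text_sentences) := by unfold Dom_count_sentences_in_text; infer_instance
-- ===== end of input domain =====

-- B replaces A's first-word index dict and per-phrase candidate-index rescans by a single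
-- direct sliding-window scan per phrase (objective: simpler); return values agree on Pre_.

-- ===== PORT A =====
-- shared by both ports: the sentence cleaning both Pythons perform with identical code
def pvClean (sent : String) : List String :=
  let s := [",", ".", "!", "?"].foldl (fun t sym => PySem.Str.lower (PySem.Str.replace t sym "")) sent
  (PySem.Str.split₀ s).map PySem.Str.lower

-- shared: kw.split('*')[0]
def pvStarHead (kw : String) : String := ((PySem.Str.split? kw "*").getD []).headD ""

-- w[:len(fw)] == fw
def pvPrefEq (w fw : String) : Bool := PySem.Str.slice w none (some (PySem.Str.len fw)) == fw

-- the index list computed for one first word (body of find_first_word_index's else-branch)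
def pvIdxFor (fws : String) (sentence : List String) : List Int :=
  if PySem.Str.isIn "*" fws then
    let fw := pvStarHead fws
    (PySem.List.pyRange 0 (sentence.length : Int) 1).foldl
      (fun acc wi => if pvPrefEq (PySem.List.pyGetD sentence wi "") fw then acc ++ [wi] else acc) []
  else
    (PySem.List.pyRange 0 (sentence.length : Int) 1).foldl
      (fun acc wi => if (PySem.List.pyGetD sentence wi "") == fws then acc ++ [wi] else acc) []

-- one iteration of find_first_word_index's loop over phrases
def pvStep (sentence : List String) (d : PySem.Dict String (List Int)) (phrase : List String) :
    PySem.Dict String (List Int) :=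
  let fws := phrase.headD ""
  if (d.get? fws).isSome then d else d.insert fws (pvIdxFor fws sentence)

def pvFFWI (phrases : List (List String)) (sentence : List String) : PySem.Dict String (List Int) :=
  phrases.foldl (pvStep sentence) PySem.Dict.empty

-- inner loop of phrase_in_sentence: none = the 'return False' on overflow,
-- some false = mismatch ('break'), some true = all keywords matched
def pvInner (sentence : List String) (f_idx : Int) : List String → Int → Option Bool
  | [], _ => some true
  | kw :: rest, off =>
    if (sentence.length : Int) ≤ f_idx + off then none
    else
      let kw' := if PySem.Str.isIn "*" kw then pvStarHead kw else kw
      if pvPrefEq (PySem.List.pyGetD sentence (f_idx + off) "") kw'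
      then pvInner sentence f_idx rest (off + 1)
      else some false

def pvPIS (phrase : List String) (idxs : List Int) (sentence : List String) : Bool :=
  match idxs with
  | [] => false
  | f :: rest =>
    match pvInner sentence f phrase 0 with
    | none => false
    | some true => true
    | some false => pvPIS phrase rest sentence

def count_sentences_in_text (words_list : List (List String)) (text_sentences : List String) : Int :=
  text_sentences.foldl (fun cnt sent =>
    let sentence := pvClean sent
    let d := pvFFWI words_list sentence
    if words_list.any (fun w => pvPIS w ((d.get? (w.headD "")).getD []) sentence)
    then cnt + 1 else cnt) 0

-- ===== PORT B =====
def pvStem (kw : String) : String := if PySem.Str.isIn "*" kw then pvStarHead kw else kw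

def pvHits (phrase words : List String) : Bool :=
  let n : Int := phrase.length
  let head := phrase.headD ""
  let star := PySem.Str.isIn "*" head
  let h := pvStem head
  (PySem.List.pyRange 0 ((words.length : Int) - n + 1) 1).any (fun i =>
    (if star then PySem.Str.startswith (PySem.List.pyGetD words i "") h
     else (PySem.List.pyGetD words i "") == head)
    && (PySem.List.pyRange 1 n 1).all (fun j =>
         PySem.Str.startswith (PySem.List.pyGetD words (i + j) "")
           (pvStem (PySem.List.pyGetD phrase j ""))))

def count_sentences_in_text_alt (words_list : List (List String)) (text_sentences : List String) : Int :=
  text_sentences.foldl (fun cnt sent =>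
    let words := pvClean sent
    if words_list.any (fun p => pvHits p words) then cnt + 1 else cnt) 0

-- ===== PRECONDITION & SPEC =====
-- Pre_ excludes a words_list containing an empty phrase: there A (phrase[0] / w[0]) and B (phrase[0]) both raise IndexError.
def Pre_count_sentences_in_text (words_list : List (List String)) (text_sentences : List String) : Prop :=
  ∀ w ∈ words_list, w ≠ []
instance (words_list : List (List String)) (text_sentences : List String) : Decidable (Pre_count_sentences_in_text words_list text_sentences) := by unfold Pre_count_sentences_in_text; infer_instance

def pvWitness_count_sentences_in_text : List (List String) × List String :=
  ([["good"], ["bad*", "news"]], ["Good news, all!", "nothing here"])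

def Spec_count_sentences_in_text (words_list : List (List String)) (text_sentences : List String) (out : Int) : Prop := out = count_sentences_in_text_alt words_list text_sentences
instance (words_list : List (List String)) (text_sentences : List String) (out : Int) : Decidable (Spec_count_sentences_in_text words_list text_sentences out) := by unfold Spec_count_sentences_in_text; infer_instance

-- ===== CLAIM (what is proved, stated in full; the proofs are below) =====
def Claim_equal_count_sentences_in_text : Prop := ∀ (words_list : List (List String)) (text_sentences : List String), Dom_count_sentences_in_text words_list text_sentences → Pre_count_sentences_in_text words_list text_sentences → Spec_count_sentences_in_text words_list text_sentences (count_sentences_in_text words_list text_sentences)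

-- ===== LEMMAS AND PROOFS =====

-- the first-word test shared by pvIdxFor (A) and pvHits' head test (B)
def pvFM (fws : String) (ws : List String) (wi : Int) : Bool :=
  if PySem.Str.isIn "*" fws then
    PySem.Str.startswith (PySem.List.pyGetD ws wi "") (pvStarHead fws)
  else (PySem.List.pyGetD ws wi "") == fws

lemma prefEq_eq_startswith (x p : String) : pvPrefEq x p = PySem.Str.startswith x p := by
  rw [Bool.eq_iff_iff]
  simp only [pvPrefEq, beq_iff_eq, ← String.toList_inj, PySem.Str.toList_slice, PySem.Chars.slice_eq_listSlice,
    PySem.Str.len_eq, PySem.List.slice_to_natCast, PySem.Str.startswith_eq, PySem.Chars.startswith_iff,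
    List.prefix_iff_eq_take]
  constructor
  · intro h; exact h.symm
  · intro h; exact h.symm

lemma ffwi_mono (ws : List String) (phrases : List (List String)) :
    ∀ (d : PySem.Dict String (List Int)) (k : String),
      (d.get? k).isSome = true → ((phrases.foldl (pvStep ws) d).get? k).isSome = true := by
  induction phrases with
  | nil => intro d k h; simpa using h
  | cons p ps ih =>
    intro d k h
    rw [List.foldl_cons]
    apply ih
    unfold pvStep
    dsimp only
    split
    · exact h
    · rw [PySem.Dict.get?_insert]
      split
      · rfl
      · exact h

lemma ffwi_values (ws : List String) (phrases : List (List String)) :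
    ∀ (d : PySem.Dict String (List Int)),
      (∀ k v, d.get? k = some v → v = pvIdxFor k ws) →
      ∀ k v, ((phrases.foldl (pvStep ws) d).get? k = some v → v = pvIdxFor k ws) := by
  induction phrases with
  | nil => intro d hd k v h; exact hd k v h
  | cons p ps ih =>
    intro d hd k v h
    rw [List.foldl_cons] at h
    refine ih (pvStep ws d p) ?_ k v h
    intro k' v' h'
    unfold pvStep at h'
    dsimp only at h'
    split at h'
    · exact hd k' v' h'
    · rw [PySem.Dict.get?_insert] at h'
      split at h'
      · cases h'; subst ‹k' = _›; rfl
      · exact hd k' v' h'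

lemma ffwi_present (ws : List String) (phrases : List (List String)) :
    ∀ (d : PySem.Dict String (List Int)) (w : List String), w ∈ phrases →
      (((phrases.foldl (pvStep ws) d).get? (w.headD "")).isSome = true) := by
  induction phrases with
  | nil => intro d w h; cases h
  | cons p ps ih =>
    intro d w h
    rw [List.foldl_cons]
    rcases List.mem_cons.mp h with h | h
    · subst h
      apply ffwi_mono
      unfold pvStep
      dsimp only
      split
      · assumption
      · rw [PySem.Dict.get?_insert]
        simp
    · exact ih _ w h

lemma ffwi_getD (ws : List String) (phrases : List (List String)) (w : List String)
    (hw : w ∈ phrases) :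
    ((pvFFWI phrases ws).get? (w.headD "")).getD [] = pvIdxFor (w.headD "") ws := by
  have hs := ffwi_present ws phrases PySem.Dict.empty w hw
  obtain ⟨v, hv⟩ := Option.isSome_iff_exists.mp hs
  have hval := ffwi_values ws phrases PySem.Dict.empty
    (by intro k v' h; rw [PySem.Dict.get?_empty] at h; cases h) (w.headD "") v hv
  unfold pvFFWI
  rw [hv, Option.getD_some, hval]

lemma inner_some_true (ws : List String) :
    ∀ (rest : List String) (f off : Int), 0 ≤ f → 0 ≤ off →
      (pvInner ws f rest off = some true ↔
        ∀ j : Nat, (hj : j < rest.length) →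
          f + off + (j : Int) < (ws.length : Int) ∧
          PySem.Str.startswith (PySem.List.pyGetD ws (f + off + (j : Int)) "") (pvStem rest[j]) = true) := by
  intro rest
  induction rest with
  | nil => intro f off _ _; simp [pvInner]
  | cons kw rest ih =>
    intro f off hf hoff
    rw [pvInner]
    split
    · rename_i hb
      constructor
      · intro h; cases h
      · intro h
        exfalso
        have := (h 0 (by simp)).1
        omega
    · rename_i hb
      rw [not_le] at hb
      simp only [prefEq_eq_startswith]
      rw [show (if PySem.Str.isIn "*" kw then pvStarHead kw else kw) = pvStem kw from rfl]
      split
      · rename_i hpref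
        rw [ih f (off + 1) hf (by omega)]
        constructor
        · intro h j hj
          cases j with
          | zero =>
            constructor
            · simpa using hb
            · simpa using hpref
          | succ j =>
            have := h j (by simpa using hj)
            constructor
            · have := this.1; omega
            · have h2 := this.2
              have harith : f + (off + 1) + (j : Int) = f + off + ((j + 1 : Nat) : Int) := by
                push_cast; omega
              rw [harith] at h2
              simpa using h2
        · intro h j hj
          have := h (j + 1) (by simpa using hj)
          constructor
          · have := this.1; omega
          · have h2 := this.2
            have harith : f + off + ((j + 1 : Nat) : Int) = f + (off + 1) + (j : Int) := by
              push_cast; omega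
            rw [harith] at h2
            simpa using h2
      · rename_i hpref
        constructor
        · intro h; cases h
        · intro h
          exfalso
          have := (h 0 (by simp)).2
          simp at this
          simp [this] at hpref

lemma inner_none (ws : List String) :
    ∀ (rest : List String) (f off : Int), pvInner ws f rest off = none →
      (ws.length : Int) < f + off + rest.length := by
  intro rest
  induction rest with
  | nil => intro f off h; cases h
  | cons kw rest ih =>
    intro f off h
    rw [pvInner] at h
    split at h
    · rename_i hb; simp only [List.length_cons]; omega
    · simp only [prefEq_eq_startswith] at h
      rw [show (if PySem.Str.isIn "*" kw then pvStarHead kw else kw) = pvStem kw from rfl] at h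
      split at h
      · have := ih f (off + 1) h
        simp only [List.length_cons]; omega
      · cases h

lemma pis_eq_any (w ws : List String) (hw : w ≠ []) :
    ∀ idxs : List Int, List.Pairwise (· ≤ ·) idxs → (∀ f ∈ idxs, 0 ≤ f) →
      pvPIS w idxs ws = idxs.any (fun f => pvInner ws f w 0 == some true) := by
  intro idxs
  induction idxs with
  | nil => intro _ _; rfl
  | cons f rest ih =>
    intro hp hnn
    rw [List.any_cons]
    rw [pvPIS]
    cases hI : pvInner ws f w 0 with
    | none =>
      have hlen := inner_none ws w f 0 hI
      have hne : ∀ f' ∈ rest, ¬ ((pvInner ws f' w 0 == some true) = true) := by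
        intro f' hf' hbad
        have heq : pvInner ws f' w 0 = some true := by simpa using hbad
        have h0 : (0:Int) ≤ f' := hnn f' (List.mem_cons_of_mem _ hf')
        have hle : f ≤ f' := (List.pairwise_cons.mp hp).1 f' hf'
        have hlw : 0 < w.length := List.length_pos_iff.mpr hw
        have hchar := (inner_some_true ws w f' 0 h0 le_rfl).mp heq
        have hx := (hchar (w.length - 1) (by omega)).1
        omega
      have hr : rest.any (fun f' => pvInner ws f' w 0 == some true) = false := by
        rw [List.any_eq_false]; exact hne
      simp [hr]
    | some b =>
      cases b with
      | true => simp
      | false =>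
        rw [show ((some false == some true) = false) from rfl, Bool.false_or]
        exact ih (List.pairwise_cons.mp hp).2 (fun x hx => hnn x (List.mem_cons_of_mem _ hx))

lemma idxFor_eq_filter (fws : String) (ws : List String) :
    pvIdxFor fws ws = (PySem.List.pyRange 0 (ws.length : Int) 1).filter (pvFM fws ws) := by
  unfold pvIdxFor pvFM
  by_cases hstar : PySem.Str.isIn "*" fws = true
  · simp only [hstar, if_true]
    have h := PySem.List.foldl_append_if
      (fun wi => pvPrefEq (PySem.List.pyGetD ws wi "") (pvStarHead fws)) (id : Int → Int)
      (PySem.List.pyRange 0 (ws.length : Int) 1) []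
    simp only [List.map_id, List.nil_append, id] at h
    rw [h]
    apply List.filter_congr
    intro x _
    rw [prefEq_eq_startswith]
  · simp only [hstar]
    have h := PySem.List.foldl_append_if
      (fun wi => (PySem.List.pyGetD ws wi "") == fws) (id : Int → Int)
      (PySem.List.pyRange 0 (ws.length : Int) 1) []
    simp only [List.map_id, List.nil_append, id] at h
    simpa using h

lemma phrase_eq (w ws : List String) (hw : w ≠ []) :
    pvPIS w (pvIdxFor (w.headD "") ws) ws = pvHits w ws := by
  have hlw : 0 < w.length := List.length_pos_iff.mpr hw
  have hhead : w.headD "" = w[0]'hlw := by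
    cases w with
    | nil => cases hw rfl
    | cons a t => rfl
  rw [idxFor_eq_filter]
  have hpair : List.Pairwise (· ≤ ·)
      ((PySem.List.pyRange 0 (ws.length : Int) 1).filter (pvFM (w.headD "") ws)) :=
    ((PySem.List.pairwise_lt_pyRange_one 0 (ws.length : Int)).filter _).imp (fun h => le_of_lt h)
  have hnn : ∀ f ∈ (PySem.List.pyRange 0 (ws.length : Int) 1).filter (pvFM (w.headD "") ws),
      (0:Int) ≤ f := by
    intro f hf
    exact (PySem.List.mem_pyRange_one.mp (List.mem_of_mem_filter hf)).1
  rw [pis_eq_any w ws hw _ hpair hnn, List.any_filter]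
  unfold pvHits
  rw [Bool.eq_iff_iff]
  simp only [List.any_eq_true, PySem.List.mem_pyRange_one, Bool.and_eq_true, List.all_eq_true,
    beq_iff_eq]
  constructor
  · rintro ⟨f, ⟨hf0, hfL⟩, hFM, hinner⟩
    have hinner' : pvInner ws f w 0 = some true := by simpa using hinner
    have hchar := (inner_some_true ws w f 0 hf0 le_rfl).mp hinner'
    have hfit : f + (w.length : Int) ≤ (ws.length : Int) := by
      have hx := (hchar (w.length - 1) (by omega)).1
      omega
    refine ⟨f, ⟨hf0, by omega⟩, ?_, ?_⟩
    · revert hFM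
      unfold pvFM pvStem
      by_cases hstar : PySem.Str.isIn "*" (w.headD "") = true
      · rw [if_pos hstar, if_pos hstar, if_pos hstar]; exact id
      · rw [if_neg hstar, if_neg hstar]; exact id
    · intro j hj
      obtain ⟨h1j, hjn⟩ := hj
      have hjn' : j.toNat < w.length := by omega
      have hsw := (hchar j.toNat hjn').2
      have harr : f + 0 + (j.toNat : Int) = f + j := by omega
      rw [harr] at hsw
      rw [PySem.List.pyGetD_of_nonneg w "" (by omega), List.getD_eq_getElem w "" hjn']
      exact hsw
  · rintro ⟨i, ⟨hi0, hiB⟩, hhd, hall⟩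
    have hin : i + (w.length : Int) ≤ (ws.length : Int) := by omega
    refine ⟨i, ⟨hi0, by omega⟩, ?_, ?_⟩
    · revert hhd
      unfold pvFM pvStem
      by_cases hstar : PySem.Str.isIn "*" (w.headD "") = true
      · rw [if_pos hstar, if_pos hstar, if_pos hstar]; exact id
      · rw [if_neg hstar, if_neg hstar]; exact id
    · show pvInner ws i w 0 = some true
      apply (inner_some_true ws w i 0 hi0 le_rfl).mpr
      intro j hj
      refine ⟨by omega, ?_⟩
      cases j with
      | zero =>
        rw [show i + 0 + ((0:Nat) : Int) = i by simp]
        rw [← hhead]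
        revert hhd
        by_cases hstar : PySem.Str.isIn "*" (w.headD "") = true
        · rw [if_pos hstar]; exact id
        · rw [if_neg hstar]
          have hstem : pvStem (w.headD "") = w.headD "" := by
            unfold pvStem; rw [if_neg hstar]
          rw [hstem]
          intro h
          rw [show PySem.List.pyGetD ws i "" = w.headD "" from by simpa using h]
          simp [PySem.Str.startswith_eq, PySem.Chars.startswith_iff]
      | succ j =>
        have hx := hall ((j+1 : Nat) : Int) ⟨by omega, by omega⟩
        rw [PySem.List.pyGetD_of_nonneg w "" (by omega)] at hx
        rw [show (((j+1 : Nat) : Int)).toNat = j + 1 by omega] at hx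
        rw [List.getD_eq_getElem w "" hj] at hx
        rw [show i + 0 + ((j+1 : Nat) : Int) = i + ((j+1 : Nat) : Int) by omega]
        exact hx

lemma per_sentence (words_list : List (List String))
    (hpre : ∀ w ∈ words_list, w ≠ []) (ws : List String) :
    (words_list.any (fun w => pvPIS w (((pvFFWI words_list ws).get? (w.headD "")).getD []) ws))
      = words_list.any (fun p => pvHits p ws) := by
  rw [Bool.eq_iff_iff]
  simp only [List.any_eq_true]
  constructor
  · rintro ⟨w, hm, h⟩
    refine ⟨w, hm, ?_⟩
    rw [← phrase_eq w ws (hpre w hm), ← ffwi_getD ws words_list w hm]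
    exact h
  · rintro ⟨w, hm, h⟩
    refine ⟨w, hm, ?_⟩
    rw [ffwi_getD ws words_list w hm, phrase_eq w ws (hpre w hm)]
    exact h

-- ===== VERDICT (by name: the statement is the Claim_ definition above) =====
theorem count_sentences_in_text_spec : Claim_equal_count_sentences_in_text := by
  intro words_list text_sentences _hdom hpre
  unfold Spec_count_sentences_in_text count_sentences_in_text count_sentences_in_text_alt
  exact PySem.List.foldl_congr_mem _ _ _ _ (fun acc sent _ => by
    dsimp only
    rw [per_sentence words_list hpre (pvClean sent)])
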